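-- pv_equiv track=rewrite | github.com/HyangDan2/LMPilot0003 | src/gui/llm_client.py | _remove_duplicate_prefix
-- ===== SOURCE A (Python) =====
-- def _remove_duplicate_prefix(new_text: str, existing_text: str) -> str:
--     trimmed_new = new_text.lstrip()
--     trimmed_existing = existing_text.rstrip()
--     if not trimmed_new:
--         return ""
--     max_overlap = min(len(trimmed_new), len(trimmed_existing), 400)
--     for overlap in range(max_overlap, 0, -1):
--         if trimmed_existing.endswith(trimmed_new[:overlap]):
--             return trimmed_new[overlap:]
--     return trimmed_new
-- ===== SOURCE B (Python) =====
-- def _remove_duplicate_prefix(new_text: str, existing_text: str) -> str: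
--     trimmed_new = new_text.lstrip()
--     trimmed_existing = existing_text.rstrip()
--     if not trimmed_new:
--         return ""
--     window = min(len(trimmed_new), len(trimmed_existing), 400)
--     pattern = trimmed_new[:window]
--     # KMP prefix-function: fail[j] = length of the longest proper border of pattern[:j]
--     fail = [0, 0]
--     q = 0
--     for i in range(1, window):
--         c = pattern[i]
--         while q > 0 and pattern[q] != c:
--             q = fail[q]
--         if pattern[q] == c:
--             q += 1
--         fail.append(q)
--     # scan the existing text once, maintaining the longest prefix of `pattern`
--     # that is a suffix of the text read so far; the final value is the overlap
--     q = 0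
--     for c in trimmed_existing:
--         while q > 0 and (q == window or pattern[q] != c):
--             q = fail[q]
--         if q < window and pattern[q] == c:
--             q += 1
--     return trimmed_new[q:]
-- ===== Notes on version B (the rewrite author's own statement) =====
-- stated objective: alternative
-- what changed: B replaces A's descending loop of endswith tests (each a fresh comparison, O(w^2) worst case) by the KMP prefix-function: it builds the failure table of pattern = trimmed_new[:window] and scans trimmed_existing once, the matched length after the last character being the overlap.
import Mathlib
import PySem

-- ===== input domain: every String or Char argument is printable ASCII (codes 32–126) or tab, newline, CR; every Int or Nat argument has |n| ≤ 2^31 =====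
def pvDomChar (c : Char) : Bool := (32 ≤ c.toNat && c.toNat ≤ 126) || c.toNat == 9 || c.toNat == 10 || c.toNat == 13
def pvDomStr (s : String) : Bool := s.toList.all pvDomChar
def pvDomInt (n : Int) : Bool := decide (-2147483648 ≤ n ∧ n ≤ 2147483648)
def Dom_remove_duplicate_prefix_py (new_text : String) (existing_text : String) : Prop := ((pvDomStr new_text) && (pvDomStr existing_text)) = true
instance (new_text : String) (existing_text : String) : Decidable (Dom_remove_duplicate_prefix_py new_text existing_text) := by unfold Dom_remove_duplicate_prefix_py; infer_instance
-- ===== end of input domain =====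

-- B replaces A's descending loop of endswith tests by the KMP prefix-function: it builds
-- the failure table of pattern = trimmed_new[:window] and scans trimmed_existing once,
-- the matched length after the last character being the overlap (objective: alternative).

-- ===== PORT A =====
-- `for overlap in range(max_overlap, 0, -1): if trimmed_existing.endswith(trimmed_new[:overlap]): return trimmed_new[overlap:]` / fall through to `return trimmed_new`
def pvALoop (tn te : List Char) : Nat → List Char
  | 0 => tn
  | k + 1 =>
      if PySem.Chars.endswith te (PySem.Chars.slice tn none (some ((k : Int) + 1))) then
        PySem.Chars.slice tn (some ((k : Int) + 1)) none
      else
        pvALoop tn te k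

def remove_duplicate_prefix_py (new_text : String) (existing_text : String) : String :=
  let trimmed_new := PySem.Chars.lstrip new_text.toList
  let trimmed_existing := PySem.Chars.rstrip existing_text.toList
  if trimmed_new.isEmpty then "" else
    let max_overlap : Int := min (min (PySem.Chars.len trimmed_new) (PySem.Chars.len trimmed_existing)) 400
    String.ofList (pvALoop trimmed_new trimmed_existing max_overlap.toNat)

-- ===== PORT B =====
-- `while q > 0 and pattern[q] != c: q = fail[q]` (failure-table build); recursion on q;
-- the inner `fail.getD q 0 < q` test is a totality guard only: a prefix-function table
-- always satisfies fail[q] < q, so the `else 0` branch is never reached.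
def pvFallB (P : List Char) (fail : List Nat) (c : Char) (q : Nat) : Nat :=
  if q = 0 then q
  else if P.getD q ' ' ≠ c then
    if _h : fail.getD q 0 < q then pvFallB P fail c (fail.getD q 0)
    else 0
  else q
termination_by q

-- `while q > 0 and (q == window or pattern[q] != c): q = fail[q]` (scan); same guard
def pvFallS (P : List Char) (fail : List Nat) (c : Char) (window : Nat) (q : Nat) : Nat :=
  if q = 0 then q
  else if q = window ∨ P.getD q ' ' ≠ c then
    if _h : fail.getD q 0 < q then pvFallS P fail c window (fail.getD q 0)
    else 0
  else q
termination_by q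

-- one iteration of `for i in range(1, window)`: state = (fail, q); appends fail[i+1]
def pvBuildStep (P : List Char) (st : List Nat × Nat) (i : Nat) : List Nat × Nat :=
  let c := P.getD i ' '    -- pattern[i], 1 ≤ i < window = len(pattern): in range
  let q1 := pvFallB P st.1 c st.2
  let q2 := if P.getD q1 ' ' = c then q1 + 1 else q1
  (st.1 ++ [q2], q2)

-- one iteration of `for c in trimmed_existing`
def pvScanStep (P : List Char) (fail : List Nat) (window : Nat) (q : Nat) (c : Char) : Nat :=
  let q1 := pvFallS P fail c window q
  if q1 < window ∧ P.getD q1 ' ' = c then q1 + 1 else q1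

def remove_duplicate_prefix_py_alt (new_text : String) (existing_text : String) : String :=
  let trimmed_new := PySem.Chars.lstrip new_text.toList
  let trimmed_existing := PySem.Chars.rstrip existing_text.toList
  if trimmed_new.isEmpty then "" else
    let window : Int := min (min (PySem.Chars.len trimmed_new) (PySem.Chars.len trimmed_existing)) 400
    let w : Nat := window.toNat                  -- window ≥ 0
    let P := trimmed_new.take w                  -- trimmed_new[:window], exact: window ≥ 0
    -- fail = [0, 0]; q = 0; for i in range(1, window): … fail.append(q)
    let fail := ((List.range' 1 (w - 1)).foldl (pvBuildStep P) ([0, 0], 0)).1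
    -- q = 0; for c in trimmed_existing: …
    let q := trimmed_existing.foldl (pvScanStep P fail w) 0
    String.ofList (trimmed_new.drop q)           -- trimmed_new[q:], exact: q ≥ 0

-- ===== PRECONDITION & SPEC =====
def Spec_remove_duplicate_prefix_py (new_text : String) (existing_text : String) (out : String) : Prop := out = remove_duplicate_prefix_py_alt new_text existing_text
instance (new_text : String) (existing_text : String) (out : String) : Decidable (Spec_remove_duplicate_prefix_py new_text existing_text out) := by unfold Spec_remove_duplicate_prefix_py; infer_instance

-- ===== CLAIM (what is proved, stated in full; the proofs are below) =====
def Claim_equal_remove_duplicate_prefix_py : Prop := ∀ (new_text : String) (existing_text : String), Dom_remove_duplicate_prefix_py new_text existing_text → Spec_remove_duplicate_prefix_py new_text existing_text (remove_duplicate_prefix_py new_text existing_text)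

-- ===== LEMMAS AND PROOFS =====

-- k is an admissible overlap: k ≤ b and P[:k] is a suffix of s
def pvCand (P s : List Char) (b k : Nat) : Prop := k ≤ b ∧ P.take k <:+ s

-- q is the largest admissible overlap
def pvIsMax (P s : List Char) (b q : Nat) : Prop := pvCand P s b q ∧ ∀ k, pvCand P s b k → k ≤ q

-- fail is a correct prefix-function table for P up to index n
def pvGoodFail (P : List Char) (fail : List Nat) (n : Nat) : Prop :=
  ∀ j, 1 ≤ j → j ≤ n → fail.getD j 0 < j ∧ P.take (fail.getD j 0) <:+ P.take j ∧
    ∀ i, i < j → P.take i <:+ P.take j → i ≤ fail.getD j 0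

-- a shorter prefix that is also a suffix of s is a suffix of the longer one (border transitivity)
lemma pvSuffix_le (P s : List Char) (k q : Nat) (hkq : k ≤ q)
    (hk : P.take k <:+ s) (hq : P.take q <:+ s) : P.take k <:+ P.take q := by
  apply List.suffix_of_suffix_length_le hk hq
  simp only [List.length_take]
  omega

lemma pvSnoc_suffix_snoc (l s : List Char) (a b : Char) :
    (l ++ [a]) <:+ (s ++ [b]) ↔ l <:+ s ∧ a = b := by
  rw [← List.reverse_prefix]
  simp only [List.reverse_append, List.reverse_singleton, List.singleton_append]
  rw [List.cons_prefix_cons, List.reverse_prefix]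
  exact and_comm

lemma pvTake_succ (P : List Char) (j : Nat) (hj : j < P.length) :
    P.take (j + 1) = P.take j ++ [P.getD j ' '] := by
  rw [List.take_add_one, List.getElem?_eq_getElem hj, List.getD_eq_getElem _ _ hj]
  rfl

lemma pvCand_snoc (P s : List Char) (c : Char) (j : Nat) (hj : j < P.length) :
    P.take (j + 1) <:+ s ++ [c] ↔ (P.take j <:+ s ∧ P.getD j ' ' = c) := by
  rw [pvTake_succ P j hj, pvSnoc_suffix_snoc]

-- the while-loop returns the first element of the failure chain of q that is 0 or matches c
lemma pvFallB_spec (P : List Char) (fail : List Nat) (c : Char) (n : Nat)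
    (hf : pvGoodFail P fail n) (q : Nat) (hq : q ≤ n) :
    pvFallB P fail c q ≤ q ∧ P.take (pvFallB P fail c q) <:+ P.take q ∧
    (pvFallB P fail c q = 0 ∨ P.getD (pvFallB P fail c q) ' ' = c) ∧
    (∀ j, j ≤ q → P.take j <:+ P.take q → P.getD j ' ' = c → j ≤ pvFallB P fail c q) := by
  revert hq
  induction q using Nat.strong_induction_on with
  | _ q ih =>
    intro hq
    rw [pvFallB]
    split_ifs with h0 hcond hlt
    · exact ⟨le_refl _, List.suffix_refl _, Or.inl h0, fun j hj _ _ => hj⟩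
    · have hg := hf q (Nat.one_le_iff_ne_zero.mpr h0) hq
      have hq' : fail.getD q 0 ≤ n := le_trans (le_of_lt hlt) hq
      obtain ⟨ih1, ih2, ih3, ih4⟩ := ih _ hlt hq'
      refine ⟨le_trans ih1 (le_of_lt hlt), ih2.trans hg.2.1, ih3, ?_⟩
      intro j hj hsuf hc
      rcases eq_or_lt_of_le hj with rfl | hjq
      · exact absurd hc hcond
      · have hjf : j ≤ fail.getD q 0 := hg.2.2 j hjq hsuf
        exact ih4 j hjf (pvSuffix_le P (P.take q) j (fail.getD q 0) hjf hsuf hg.2.1) hc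
    · exact absurd (hf q (Nat.one_le_iff_ne_zero.mpr h0) hq).1 hlt
    · exact ⟨le_refl _, List.suffix_refl _, Or.inr (not_not.mp hcond), fun j hj _ _ => hj⟩

lemma pvFallS_spec (P : List Char) (fail : List Nat) (c : Char) (w : Nat)
    (hf : pvGoodFail P fail w) (q : Nat) (hq : q ≤ w) :
    pvFallS P fail c w q ≤ q ∧ P.take (pvFallS P fail c w q) <:+ P.take q ∧
    (pvFallS P fail c w q = 0 ∨ (pvFallS P fail c w q ≠ w ∧ P.getD (pvFallS P fail c w q) ' ' = c)) ∧
    (∀ j, j ≤ q → P.take j <:+ P.take q → j ≠ w → P.getD j ' ' = c → j ≤ pvFallS P fail c w q) := by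
  revert hq
  induction q using Nat.strong_induction_on with
  | _ q ih =>
    intro hq
    rw [pvFallS]
    split_ifs with h0 hcond hlt
    · exact ⟨le_refl _, List.suffix_refl _, Or.inl h0, fun j hj _ _ _ => hj⟩
    · have hg := hf q (Nat.one_le_iff_ne_zero.mpr h0) hq
      have hq' : fail.getD q 0 ≤ w := le_trans (le_of_lt hlt) hq
      obtain ⟨ih1, ih2, ih3, ih4⟩ := ih _ hlt hq'
      refine ⟨le_trans ih1 (le_of_lt hlt), ih2.trans hg.2.1, ih3, ?_⟩
      intro j hj hsuf hjw hc
      rcases eq_or_lt_of_le hj with rfl | hjq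
      · rcases hcond with h | h
        · exact absurd h hjw
        · exact absurd hc h
      · have hjf : j ≤ fail.getD q 0 := hg.2.2 j hjq hsuf
        exact ih4 j hjf (pvSuffix_le P (P.take q) j (fail.getD q 0) hjf hsuf hg.2.1) hjw hc
    · exact absurd (hf q (Nat.one_le_iff_ne_zero.mpr h0) hq).1 hlt
    · rw [not_or, not_not] at hcond
      exact ⟨le_refl _, List.suffix_refl _, Or.inr ⟨hcond.1, hcond.2⟩,
        fun j hj _ _ _ => hj⟩

-- one scan step preserves "q is the largest prefix of P that is a suffix of the text read"
lemma pvScanStep_max (P : List Char) (fail : List Nat) (w : Nat) (hw : w = P.length)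
    (hf : pvGoodFail P fail w) (s : List Char) (c : Char) (q : Nat)
    (hq : pvIsMax P s w q) : pvIsMax P (s ++ [c]) w (pvScanStep P fail w q c) := by
  obtain ⟨⟨hqw, hqs⟩, hqmax⟩ := hq
  obtain ⟨hr_le, hr_suf, hr_disj, hr_max⟩ := pvFallS_spec P fail c w hf q hqw
  unfold pvScanStep pvIsMax pvCand
  set r := pvFallS P fail c w q with hr
  by_cases hbr : r < w ∧ P.getD r ' ' = c
  · rw [if_pos hbr]
    refine ⟨⟨by omega, ?_⟩, ?_⟩
    · rw [pvCand_snoc P s c r (by omega)]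
      exact ⟨hr_suf.trans hqs, hbr.2⟩
    · rintro k ⟨hkw, hks⟩
      cases k with
      | zero => omega
      | succ j =>
        rw [pvCand_snoc P s c j (by omega)] at hks
        have hjq : j ≤ q := hqmax j ⟨by omega, hks.1⟩
        have hjb : P.take j <:+ P.take q := pvSuffix_le P s j q hjq hks.1 hqs
        have := hr_max j hjq hjb (by omega) hks.2
        omega
  · rw [if_neg hbr]
    have hr0 : r = 0 := by
      rcases hr_disj with h | ⟨hne, hc⟩
      · exact h
      · exact absurd ⟨lt_of_le_of_ne (le_trans hr_le hqw) hne, hc⟩ hbr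
    refine ⟨⟨by omega, by rw [hr0]; simp⟩, ?_⟩
    rintro k ⟨hkw, hks⟩
    cases k with
    | zero => omega
    | succ j =>
      rw [pvCand_snoc P s c j (by omega)] at hks
      have hjq : j ≤ q := hqmax j ⟨by omega, hks.1⟩
      have hjb : P.take j <:+ P.take q := pvSuffix_le P s j q hjq hks.1 hqs
      have hjr := hr_max j hjq hjb (by omega) hks.2
      exfalso
      apply hbr
      refine ⟨by omega, ?_⟩
      have hj0 : j = 0 := by omega
      rw [hr0, ← hj0]
      exact hks.2

lemma pvScan_max (P : List Char) (fail : List Nat) (w : Nat) (hw : w = P.length)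
    (hf : pvGoodFail P fail w) (s : List Char) :
    pvIsMax P s w (s.foldl (pvScanStep P fail w) 0) := by
  induction s using List.reverseRecOn with
  | nil =>
    refine ⟨⟨Nat.zero_le _, by simp⟩, ?_⟩
    rintro k ⟨hkw, hks⟩
    rcases List.take_eq_nil_iff.mp (List.suffix_nil.mp hks) with h | h
    · omega
    · subst h; simp at hw; omega
  | append_singleton s c ih =>
    rw [List.foldl_append, List.foldl_cons, List.foldl_nil]
    exact pvScanStep_max P fail w hw hf s c _ ih

-- build-loop invariant: after t iterations the table is a correct prefix function up to t+1
lemma pvBuild_good (P : List Char) (w : Nat) (hw : w = P.length) :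
    ∀ t, t + 1 ≤ w →
    (((List.range' 1 t).foldl (pvBuildStep P) ([0, 0], 0)).1.length = t + 2) ∧
    pvGoodFail P ((List.range' 1 t).foldl (pvBuildStep P) ([0, 0], 0)).1 (t + 1) ∧
    ((List.range' 1 t).foldl (pvBuildStep P) ([0, 0], 0)).2
      = ((List.range' 1 t).foldl (pvBuildStep P) ([0, 0], 0)).1.getD (t + 1) 0 := by
  intro t
  induction t with
  | zero =>
    intro _
    refine ⟨rfl, ?_, rfl⟩
    intro j h1 h2
    have hj1 : j = 1 := by omega
    subst hj1
    exact ⟨by simp, by simp, fun i hi _ => by omega⟩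
  | succ t ih =>
    intro htw
    obtain ⟨hlen, hgood, hq⟩ := ih (by omega)
    have hrange : List.range' 1 (t + 1) = List.range' 1 t ++ [t + 1] := by
      rw [List.range'_concat]
      congr 1
      simp [Nat.add_comm]
    rw [hrange, List.foldl_append, List.foldl_cons, List.foldl_nil]
    set st := (List.range' 1 t).foldl (pvBuildStep P) ([0, 0], 0) with hst
    set failL := st.1 with hfailL
    set q := st.2 with hqdef
    -- facts about q from goodness at index t+1
    have hg := hgood (t + 1) (by omega) (le_refl _)
    rw [← hq] at hg
    have hqt : q ≤ t := by omega
    have hqsuf : P.take q <:+ P.take (t + 1) := hg.2.1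
    have hqmax : ∀ i, i < t + 1 → P.take i <:+ P.take (t + 1) → i ≤ q := hg.2.2
    have htP : t + 1 < P.length := by omega
    -- the fall step
    obtain ⟨hr_le, hr_suf, hr_disj, hr_max⟩ :=
      pvFallB_spec P failL (P.getD (t + 1) ' ') (t + 1) hgood q (by omega)
    set c := P.getD (t + 1) ' ' with hc
    set r := pvFallB P failL c q with hrdef
    set q2 := if P.getD r ' ' = c then r + 1 else r with hq2
    have hstep : pvBuildStep P st (t + 1) = (failL ++ [q2], q2) := rfl
    rw [hstep]
    have htake2 : P.take (t + 2) = P.take (t + 1) ++ [c] := pvTake_succ P (t + 1) htP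
    -- q2 is the largest k ≤ t+1 with P.take k a suffix of P.take (t+2)
    have hmax2 : pvIsMax P (P.take (t + 2)) (t + 1) q2 := by
      unfold pvIsMax pvCand
      by_cases hbr : P.getD r ' ' = c
      · have hq2v : q2 = r + 1 := by rw [hq2, if_pos hbr]
        rw [hq2v]
        refine ⟨⟨by omega, ?_⟩, ?_⟩
        · rw [htake2, pvCand_snoc P (P.take (t + 1)) c r (by omega)]
          exact ⟨hr_suf.trans hqsuf, hbr⟩
        · rintro k ⟨hkw, hks⟩
          cases k with
          | zero => omega
          | succ j =>
            rw [htake2, pvCand_snoc P (P.take (t + 1)) c j (by omega)] at hks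
            have hjq : j ≤ q := hqmax j (by omega) hks.1
            have hjb : P.take j <:+ P.take q :=
              pvSuffix_le P (P.take (t + 1)) j q hjq hks.1 hqsuf
            have := hr_max j hjq hjb hks.2
            omega
      · have hr0 : r = 0 := by
          rcases hr_disj with h | h
          · exact h
          · exact absurd h hbr
        have hq2v : q2 = r := by rw [hq2, if_neg hbr]
        rw [hq2v, hr0]
        refine ⟨⟨by omega, by simp⟩, ?_⟩
        rintro k ⟨hkw, hks⟩
        cases k with
        | zero => omega
        | succ j =>
          rw [htake2, pvCand_snoc P (P.take (t + 1)) c j (by omega)] at hks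
          have hjq : j ≤ q := hqmax j (by omega) hks.1
          have hjb : P.take j <:+ P.take q :=
            pvSuffix_le P (P.take (t + 1)) j q hjq hks.1 hqsuf
          have hjr := hr_max j hjq hjb hks.2
          have hj0 : j = 0 := by omega
          exfalso
          apply hbr
          rw [hr0, ← hj0]
          exact hks.2
    have hq2t : q2 ≤ t + 1 := hmax2.1.1
    -- the three conjuncts for the new state (failL ++ [q2], q2)
    have hgetq2 : (failL ++ [q2]).getD (t + 2) 0 = q2 := by
      rw [List.getD_append_right _ _ _ _ (by omega)]
      rw [hlen]
      simp
    refine ⟨by simp [hlen], ?_, by simp only [hgetq2]⟩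
    intro j h1 h2
    rcases Nat.lt_or_ge j (t + 2) with hj | hj
    · have hjlen : j < failL.length := by omega
      rw [List.getD_append _ _ _ _ hjlen]
      exact hgood j h1 (by omega)
    · have hj2 : j = t + 2 := by omega
      subst hj2
      rw [hgetq2]
      refine ⟨by omega, hmax2.1.2, ?_⟩
      intro i hi hisuf
      exact hmax2.2 i ⟨by omega, hisuf⟩

-- A's descending loop returns the drop by the largest admissible overlap
lemma pvALoop_drop (tn te : List Char) : ∀ k q, k ≤ tn.length → pvIsMax tn te k q →
    pvALoop tn te k = tn.drop q := by
  intro k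
  induction k with
  | zero =>
    intro q _ h
    have hq0 : q = 0 := Nat.le_zero.mp h.1.1
    subst hq0
    simp [pvALoop]
  | succ k ih =>
    intro q hk h
    rw [pvALoop]
    have hcast : ((k : Int) + 1) = (((k + 1 : Nat) : Int)) := by push_cast; ring
    have hsliceTo : PySem.Chars.slice tn none (some ((k : Int) + 1)) = tn.take (k + 1) := by
      rw [hcast, PySem.Chars.slice_eq_listSlice, PySem.List.slice_to_natCast]
    by_cases hend : tn.take (k + 1) <:+ te
    · have hb : PySem.Chars.endswith te (PySem.Chars.slice tn none (some ((k : Int) + 1))) = true := by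
        rw [hsliceTo, PySem.Chars.endswith_iff]
        exact hend
      rw [hb, if_pos rfl]
      have hq : q = k + 1 := by
        have h1 : q ≤ k + 1 := h.1.1
        have h2 : k + 1 ≤ q := h.2 (k + 1) ⟨le_refl _, hend⟩
        omega
      rw [hq, hcast, PySem.Chars.slice_eq_listSlice, PySem.List.slice_from_natCast]
    · have hb : PySem.Chars.endswith te (PySem.Chars.slice tn none (some ((k : Int) + 1))) = false := by
        rw [hsliceTo]
        rw [← Bool.not_eq_true, PySem.Chars.endswith_iff]
        exact hend
      rw [hb]
      simp only [Bool.false_eq_true, if_false]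
      apply ih q (by omega)
      obtain ⟨⟨hqw, hqs⟩, hmax⟩ := h
      have hqk : q ≤ k := by
        rcases Nat.lt_or_ge q (k + 1) with h' | h'
        · omega
        · exfalso; apply hend
          have : q = k + 1 := by omega
          rw [← this]; exact hqs
      exact ⟨⟨hqk, hqs⟩, fun j hj => hmax j ⟨Nat.le_succ_of_le hj.1, hj.2⟩⟩

-- candidates w.r.t. P = tn.take w are candidates w.r.t. tn
lemma pvIsMax_take (tn te : List Char) (w q : Nat) (_hw : w ≤ tn.length)
    (h : pvIsMax (tn.take w) te w q) : pvIsMax tn te w q := by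
  have conv : ∀ k, k ≤ w → (tn.take w).take k = tn.take k := by
    intro k hk
    rw [List.take_take]
    congr 1
    omega
  obtain ⟨⟨hqw, hqs⟩, hmax⟩ := h
  refine ⟨⟨hqw, ?_⟩, ?_⟩
  · rw [← conv q hqw]; exact hqs
  · rintro k ⟨hkw, hks⟩
    exact hmax k ⟨hkw, by rw [conv k hkw]; exact hks⟩

-- ===== VERDICT (by name: the statement is the Claim_ definition above) =====
theorem remove_duplicate_prefix_py_spec : Claim_equal_remove_duplicate_prefix_py := by
  intro nt et _
  unfold Spec_remove_duplicate_prefix_py remove_duplicate_prefix_py remove_duplicate_prefix_py_alt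
  simp only []
  set tn := PySem.Chars.lstrip nt.toList with htn
  set te := PySem.Chars.rstrip et.toList with hte
  by_cases hemp : tn.isEmpty
  · simp [hemp]
  · simp only [hemp, if_false, Bool.false_eq_true]
    set L : Int := min (min (PySem.Chars.len tn) (PySem.Chars.len te)) 400 with hL
    have hL0 : 0 ≤ L := by
      rw [hL, PySem.Chars.len_eq, PySem.Chars.len_eq]; omega
    set w : Nat := L.toNat with hwdef
    have hwn : w ≤ tn.length := by
      have : L ≤ PySem.Chars.len tn := le_trans (min_le_left _ _) (min_le_left _ _)
      rw [PySem.Chars.len_eq] at this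
      omega
    have hwe : w ≤ te.length := by
      have : L ≤ PySem.Chars.len te := le_trans (min_le_left _ _) (min_le_right _ _)
      rw [PySem.Chars.len_eq] at this
      omega
    set P := tn.take w with hP
    have hPlen : w = P.length := by
      rw [hP, List.length_take]; omega
    set failL := ((List.range' 1 (w - 1)).foldl (pvBuildStep P) ([0, 0], 0)).1 with hfailL
    have hgood : pvGoodFail P failL w := by
      rcases Nat.eq_zero_or_pos w with hw0 | hw1
      · intro j h1 h2; omega
      · have := (pvBuild_good P w hPlen (w - 1) (by omega)).2.1
        have heq : w - 1 + 1 = w := by omega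
        rw [heq] at this
        exact this
    have hscan := pvScan_max P failL w hPlen hgood te
    have hA := pvALoop_drop tn te w _ hwn (pvIsMax_take tn te w _ hwn hscan)
    rw [hA]
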